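-- pv_equiv track=rewrite | github.com/IgorShPg/pythonprac | 20231031/3/prog.py | make_maze
-- ===== SOURCE A (Python) =====
-- def make_maze(n):
--     m = [['\u2588' for i in range(2*n+1)] for j in range(2*n+1)]
--     for i in range(len(m)):
--         for j in range(len(m[i])):
--             if i !=0 and i!=len(m)-1:
--                 if j%2 != 0 and i%2!=0:
--                     m[i][j] = u"\u00B7"
--     return m
-- ===== SOURCE B (Python) =====
-- def make_maze(n):
--     # ring growth: start from the 1x1 maze and add one ring (two columns,
--     # two rows) per step, extending the existing rows in place
--     if n < 0:
--         return []
--     m = [['\u2588']]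
--     for k in range(n):
--         for i, row in enumerate(m):
--             row += ['\u00B7', '\u2588'] if i % 2 == 1 else ['\u2588', '\u2588']
--         size = 2 * (k + 1) + 1
--         m.append(['\u2588' if j % 2 == 0 else '\u00B7' for j in range(size)])
--         m.append(['\u2588'] * size)
--     return m
-- ===== Notes on version B (the rewrite author's own statement) =====
-- stated objective: alternative
-- what changed: B builds the maze by ring growth: starting from the 1x1 maze it adds one ring per step, extending every existing row by two cells (dot+block on odd rows) and appending two new rows, instead of A's double loop that prefills a (2n+1)^2 grid and then rewrites odd-odd interior cells in place.
import Mathlib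
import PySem

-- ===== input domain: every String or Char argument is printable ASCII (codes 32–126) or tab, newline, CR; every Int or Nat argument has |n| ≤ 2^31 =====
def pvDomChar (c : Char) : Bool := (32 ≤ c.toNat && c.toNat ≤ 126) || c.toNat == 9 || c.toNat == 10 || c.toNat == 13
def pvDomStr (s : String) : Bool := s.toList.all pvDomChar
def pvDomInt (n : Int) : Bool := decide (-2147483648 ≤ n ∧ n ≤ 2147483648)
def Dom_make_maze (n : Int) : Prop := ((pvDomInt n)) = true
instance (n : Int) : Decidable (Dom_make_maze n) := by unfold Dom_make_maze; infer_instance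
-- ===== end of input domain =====

-- B builds the maze iteratively by ring growth (add two columns and two rows
-- per step) instead of A's per-cell conditional rewrite pass; objective: alternative.

-- ===== PORT A =====
def make_maze (n : Int) : List (List String) :=
  let m0 : List (List String) :=
    (PySem.List.pyRange 0 (2*n+1) 1).map
      (fun _j => (PySem.List.pyRange 0 (2*n+1) 1).map (fun _i => "█"))
  (PySem.List.pyRange 0 (m0.length : Int) 1).foldl
    (fun m i =>
      (PySem.List.pyRange 0 ((PySem.List.pyGetD m i []).length : Int) 1).foldl
        (fun m2 j =>
          if i ≠ 0 ∧ i ≠ (m2.length : Int) - 1 then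
            if PySem.Int.mod j 2 ≠ 0 ∧ PySem.Int.mod i 2 ≠ 0 then
              PySem.List.pySetD m2 i (PySem.List.pySetD (PySem.List.pyGetD m2 i []) j "·")
            else m2
          else m2)
        m)
    m0

-- ===== PORT B =====
-- Source B's ring-growth loop body: extend every row by two cells, append two rows
def ringStep (m : List (List String)) (k : Int) : List (List String) :=
  let m1 := (PySem.List.enumerate m).map
    (fun p => p.2 ++ (if PySem.Int.mod p.1 2 = 1 then ["·", "█"] else ["█", "█"]))
  let size : Int := 2*(k+1)+1
  m1
    ++ [(PySem.List.pyRange 0 size 1).map (fun j => if PySem.Int.mod j 2 = 0 then "█" else "·")]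
    ++ [List.replicate size.toNat "█"]

def make_maze_alt (n : Int) : List (List String) :=
  if n < 0 then []
  else (PySem.List.pyRange 0 n 1).foldl ringStep [["█"]]

-- ===== PRECONDITION & SPEC =====
def Spec_make_maze (n : Int) (out : List (List String)) : Prop := out = make_maze_alt n
instance (n : Int) (out : List (List String)) : Decidable (Spec_make_maze n out) := by unfold Spec_make_maze; infer_instance

-- ===== CLAIM (what is proved, stated in full; the proofs are below) =====
def Claim_equal_make_maze : Prop := ∀ (n : Int), Dom_make_maze n → Spec_make_maze n (make_maze n)

-- ===== LEMMAS AND PROOFS =====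

-- the all-block row, the block/dot row, and the grid after the first k outer steps
def Erow (N : Nat) : List String := List.replicate N "█"
def Orow (N : Nat) : List String := (List.range N).map (fun j => if j % 2 = 1 then "·" else "█")
def Mk (N k : Nat) : List (List String) :=
  (List.range N).map (fun i => if i < k ∧ i % 2 = 1 then Orow N else Erow N)

lemma set_map_range {α : Type} (N m : Nat) (f : Nat → α) (v : α) :
    ((List.range N).map f).set m v = (List.range N).map (fun t => if t = m then v else f t) := by
  apply List.ext_getElem
  · simp
  · intro i h1 h2
    simp only [List.getElem_set, List.getElem_map, List.getElem_range]
    by_cases h : m = i <;> simp [h, Ne.symm]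

-- a fold that only ever rewrites row i, with a guard reading only j and the (invariant) length
lemma foldl_set_row {α : Type} (i : Nat) (v : α) (c : Nat → Nat → Prop)
    [inst : ∀ a b, Decidable (c a b)] :
    ∀ (js : List Nat) (M : List (List α)), i < M.length →
    js.foldl (fun m2 j => if c j m2.length then m2.set i ((m2.getD i []).set j v) else m2) M
      = M.set i (js.foldl (fun r j => if c j M.length then r.set j v else r) (M.getD i [])) := by
  intro js
  induction js with
  | nil =>
      intro M hM
      rw [List.foldl_nil, List.foldl_nil, List.getD_eq_getElem M [] hM,
        List.set_getElem_self]
  | cons j js ih =>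
      intro M hM
      by_cases h : c j M.length
      · simp only [List.foldl_cons, if_pos h]
        rw [ih (M.set i ((M.getD i []).set j v)) (by simpa using hM)]
        simp only [List.length_set, List.set_set]
        congr 1
        congr 1
        rw [List.getD_eq_getElem _ [] (by simpa using hM),
            List.getElem_set_self, List.getD_eq_getElem M [] hM]
      · simp only [List.foldl_cons, if_neg h]
        exact ih M hM

lemma row_fold (N : Nat) :
    ∀ m ≤ N, (List.range m).foldl (fun r j => if j % 2 = 1 then r.set j "·" else r) (Erow N)
      = (List.range N).map (fun t => if t < m ∧ t % 2 = 1 then "·" else "█") := by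
  intro m
  induction m with
  | zero =>
      intro _
      simp [Erow]
  | succ m ih =>
      intro hm
      rw [List.range_succ, List.foldl_append, ih (by omega), List.foldl_cons, List.foldl_nil]
      by_cases h : m % 2 = 1
      · rw [if_pos h, set_map_range]
        apply List.map_congr_left
        intro t _
        by_cases ht : t = m
        · subst ht; simp [h]
        · rw [if_neg ht]
          have he : (t < m + 1 ∧ t % 2 = 1) = (t < m ∧ t % 2 = 1) := by
            apply propext
            constructor <;> rintro ⟨h1, h2⟩ <;> exact ⟨by omega, h2⟩
          simp only [he]
      · rw [if_neg h]
        apply List.map_congr_left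
        intro t _
        have he : (t < m + 1 ∧ t % 2 = 1) = (t < m ∧ t % 2 = 1) := by
          apply propext
          constructor <;> rintro ⟨h1, h2⟩ <;> exact ⟨by omega, h2⟩
        simp only [he]

lemma length_Mk (N k : Nat) : (Mk N k).length = N := by simp [Mk]
lemma length_Erow (N : Nat) : (Erow N).length = N := by simp [Erow]

lemma getD_Mk (N k i : Nat) (h : i < N) :
    (Mk N k).getD i [] = if i < k ∧ i % 2 = 1 then Orow N else Erow N := by
  simpa [Mk] using PySem.List.getD_map_range
    (fun i => if i < k ∧ i % 2 = 1 then Orow N else Erow N) N i [] h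

lemma foldl_const {α β : Type} (l : List β) (init : α) :
    l.foldl (fun x _ => x) init = init := List.foldl_fixed l

lemma mod_two_cast (a : Nat) : PySem.Int.mod (a : Int) 2 = ((a % 2 : Nat) : Int) := by
  exact_mod_cast PySem.Int.mod_natCast a 2

-- the common closed form: row i is the dot row iff i is odd
def Closed (N : Nat) : List (List String) :=
  (List.range N).map (fun i => if i % 2 = 1 then Orow N else Erow N)

lemma make_maze_eq (n : Int) : make_maze n = Closed (2*n+1).toNat := by
  set N := (2*n+1).toNat with hN
  have hodd : 0 < N → N % 2 = 1 := by
    intro h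
    have : (N : Int) = 2*n+1 := by omega
    omega
  -- the initial grid is N copies of the all-block row
  have hm0 : (PySem.List.pyRange 0 (2*n+1) 1).map
      (fun _j => (PySem.List.pyRange 0 (2*n+1) 1).map (fun _i : Int => ("█" : String)))
      = Mk N 0 := by
    rw [PySem.List.pyRange_zero]
    simp only [List.map_map, Mk]
    apply List.map_congr_left
    intro t _
    rw [if_neg (by omega : ¬ (t < 0 ∧ t % 2 = 1))]
    simp only [Function.comp_def, Erow]
    rw [List.map_const', List.length_range]
  unfold make_maze
  rw [hm0]
  show (PySem.List.pyRange 0 ((Mk N 0).length : Int) 1).foldl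
    (fun m i =>
      (PySem.List.pyRange 0 ((PySem.List.pyGetD m i []).length : Int) 1).foldl
        (fun m2 j =>
          if i ≠ 0 ∧ i ≠ (m2.length : Int) - 1 then
            if PySem.Int.mod j 2 ≠ 0 ∧ PySem.Int.mod i 2 ≠ 0 then
              PySem.List.pySetD m2 i (PySem.List.pySetD (PySem.List.pyGetD m2 i []) j "·")
            else m2
          else m2)
        m)
    (Mk N 0) = _
  rw [length_Mk, PySem.List.pyRange_zero_nat, List.foldl_map]
  -- invariant: after the first k outer steps the grid is Mk N k
  have main : ∀ k ≤ N, (List.range k).foldl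
      (fun m (i : Nat) =>
        (PySem.List.pyRange 0 ((PySem.List.pyGetD m (i : Int) []).length : Int) 1).foldl
          (fun m2 j =>
            if (i : Int) ≠ 0 ∧ (i : Int) ≠ (m2.length : Int) - 1 then
              if PySem.Int.mod j 2 ≠ 0 ∧ PySem.Int.mod (i : Int) 2 ≠ 0 then
                PySem.List.pySetD m2 (i : Int)
                  (PySem.List.pySetD (PySem.List.pyGetD m2 (i : Int) []) j "·")
              else m2
            else m2)
          m)
      (Mk N 0) = Mk N k := by
    intro k
    induction k with
    | zero => intro _; simp
    | succ k ih =>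
      intro hk
      rw [List.range_succ, List.foldl_append, ih (by omega), List.foldl_cons, List.foldl_nil]
      have hkN : k < N := by omega
      have hNodd : N % 2 = 1 := hodd (by omega)
      -- the row read at index k is still the all-block row
      rw [PySem.List.pyGetD_natCast, getD_Mk N k k hkN,
        if_neg (by omega : ¬ (k < k ∧ k % 2 = 1)),
        length_Erow, PySem.List.pyRange_zero_nat, List.foldl_map]
      by_cases hk2 : k % 2 = 1
      · -- odd interior row: every odd column becomes a dot
        have hfun : (fun (m2 : List (List String)) (j : Nat) =>
              if (k : Int) ≠ 0 ∧ (k : Int) ≠ (m2.length : Int) - 1 then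
                if PySem.Int.mod (j : Int) 2 ≠ 0 ∧ PySem.Int.mod (k : Int) 2 ≠ 0 then
                  PySem.List.pySetD m2 (k : Int)
                    (PySem.List.pySetD (PySem.List.pyGetD m2 (k : Int) []) (j : Int) "·")
                else m2
              else m2)
            = (fun (m2 : List (List String)) (j : Nat) =>
              if ((k : Int) ≠ 0 ∧ (k : Int) ≠ (m2.length : Int) - 1) ∧ j % 2 = 1 then
                m2.set k ((m2.getD k []).set j "·") else m2) := by
          funext m2 j
          rw [PySem.List.pyGetD_natCast, PySem.List.pySetD_natCast, PySem.List.pySetD_natCast,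
            mod_two_cast j, mod_two_cast k]
          split_ifs with hA hB hC hC <;> first
            | rfl
            | (exfalso; omega)
        rw [hfun, foldl_set_row k "·"
              (fun j L => ((k : Int) ≠ 0 ∧ (k : Int) ≠ (L : Int) - 1) ∧ j % 2 = 1)
              (List.range N) (Mk N k) (by rw [length_Mk]; exact hkN),
            getD_Mk N k k hkN, if_neg (by omega : ¬ (k < k ∧ k % 2 = 1)), length_Mk]
        have hguard : (fun (r : List String) (j : Nat) =>
              if ((k : Int) ≠ 0 ∧ (k : Int) ≠ (N : Int) - 1) ∧ j % 2 = 1 then r.set j "·" else r)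
            = (fun (r : List String) (j : Nat) => if j % 2 = 1 then r.set j "·" else r) := by
          funext r j
          have hk0 : (k : Int) ≠ 0 := by omega
          have hkN1 : (k : Int) ≠ (N : Int) - 1 := by omega
          by_cases hj : j % 2 = 1
          · rw [if_pos ⟨⟨hk0, hkN1⟩, hj⟩, if_pos hj]
          · rw [if_neg (fun h => hj h.2), if_neg hj]
        rw [hguard, row_fold N N le_rfl]
        have hOr : (List.range N).map (fun t => if t < N ∧ t % 2 = 1 then "·" else "█")
            = Orow N := by
          apply List.map_congr_left
          intro t ht
          rw [List.mem_range] at ht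
          simp [ht]
        rw [hOr, Mk, set_map_range]
        apply List.map_congr_left
        intro t _
        by_cases ht : t = k
        · subst ht; simp [hk2]
        · rw [if_neg ht]
          have he : (t < k + 1 ∧ t % 2 = 1) = (t < k ∧ t % 2 = 1) := by
            apply propext
            constructor <;> rintro ⟨h1, h2⟩ <;> exact ⟨by omega, h2⟩
          simp only [he]
      · -- even row index: the inner loop changes nothing
        have hfun : (fun (m2 : List (List String)) (j : Nat) =>
              if (k : Int) ≠ 0 ∧ (k : Int) ≠ (m2.length : Int) - 1 then
                if PySem.Int.mod (j : Int) 2 ≠ 0 ∧ PySem.Int.mod (k : Int) 2 ≠ 0 then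
                  PySem.List.pySetD m2 (k : Int)
                    (PySem.List.pySetD (PySem.List.pyGetD m2 (k : Int) []) (j : Int) "·")
                else m2
              else m2)
            = (fun (m2 : List (List String)) (_ : Nat) => m2) := by
          funext m2 j
          rw [mod_two_cast k]
          split_ifs with hA hB <;> first
            | rfl
            | (exfalso; omega)
        rw [hfun, foldl_const]
        unfold Mk
        apply List.map_congr_left
        intro t _
        have he : (t < k + 1 ∧ t % 2 = 1) = (t < k ∧ t % 2 = 1) := by
          apply propext
          constructor <;> rintro ⟨h1, h2⟩ <;> refine ⟨by omega, h2⟩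
        simp only [he]
  rw [main N le_rfl]
  unfold Mk Closed
  apply List.map_congr_left
  intro t ht
  rw [List.mem_range] at ht
  simp [ht]

-- extending each kind of row by one ring step
lemma Erow_succ2 (N : Nat) : Erow N ++ ["█", "█"] = Erow (N + 2) := by
  simp [Erow, List.replicate_succ']

lemma Orow_succ2 (N : Nat) (h : N % 2 = 1) : Orow N ++ ["·", "█"] = Orow (N + 2) := by
  unfold Orow
  rw [show N + 2 = (N + 1) + 1 by rfl, List.range_succ, List.range_succ, List.map_append,
    List.map_append]
  simp [h, Nat.add_mod]

lemma Orow_pyRange (N : Nat) :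
    (PySem.List.pyRange 0 (N : Int) 1).map
      (fun j => if PySem.Int.mod j 2 = 0 then "█" else "·") = Orow N := by
  rw [PySem.List.pyRange_zero, List.map_map]
  unfold Orow
  apply List.map_congr_left
  intro j _
  simp only [Function.comp_def, mod_two_cast j]
  by_cases hj : j % 2 = 1
  · rw [if_neg (by omega : ¬ ((j % 2 : Nat) : Int) = 0), if_pos hj]
  · rw [if_pos (by omega : ((j % 2 : Nat) : Int) = 0), if_neg hj]

lemma ringFold_eq (k : Nat) :
    (List.range k).foldl (fun m (t : Nat) => ringStep m (t : Int)) [["█"]] = Closed (2*k+1) := by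
  induction k with
  | zero =>
      show [["█"]] = Closed 1
      simp [Closed, List.range_succ, Erow]
  | succ k ih =>
      rw [List.range_succ, List.foldl_append, ih, List.foldl_cons, List.foldl_nil]
      show ((PySem.List.enumerate (Closed (2*k+1))).map
          (fun p => p.2 ++ (if PySem.Int.mod p.1 2 = 1 then ["·", "█"] else ["█", "█"])))
        ++ [(PySem.List.pyRange 0 (2*((k:Int)+1)+1) 1).map
              (fun j => if PySem.Int.mod j 2 = 0 then "█" else "·")]
        ++ [List.replicate ((2*((k:Int)+1)+1)).toNat "█"] = Closed (2*(k+1)+1)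
      have hsz : ((2*((k:Int)+1)+1)).toNat = 2*k+3 := by omega
      have hszi : (2*((k:Int)+1)+1) = ((2*k+3 : Nat) : Int) := by omega
      rw [hsz, hszi, Orow_pyRange (2*k+3)]
      -- the grown inner part
      have hgrown : (PySem.List.enumerate (Closed (2*k+1))).map
          (fun p => p.2 ++ (if PySem.Int.mod p.1 2 = 1 then ["·", "█"] else ["█", "█"]))
          = (List.range (2*k+1)).map (fun i => if i % 2 = 1 then Orow (2*k+3) else Erow (2*k+3)) := by
        unfold Closed
        rw [PySem.List.enumerate_eq_zipIdx_map]
        apply List.ext_getElem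
        · simp
        · intro i h1 h2
          simp only [List.getElem_map, List.getElem_zipIdx, List.getElem_range]
          have hi : i < 2*k+1 := by simpa using h2
          rw [show ((0:Int) + ((0 + i : Nat) : Int)) = (i : Int) by push_cast; ring, mod_two_cast i]
          by_cases hi2 : i % 2 = 1
          · rw [if_pos (by omega : ((i % 2 : Nat) : Int) = 1), if_pos hi2, if_pos hi2,
              Orow_succ2 (2*k+1) (by omega)]
          · rw [if_neg (by omega : ¬ ((i % 2 : Nat) : Int) = 1), if_neg hi2, if_neg hi2,
              Erow_succ2 (2*k+1)]
      rw [hgrown]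
      have hclosed : Closed (2*(k+1)+1)
          = (List.range (2*k+1)).map (fun i => if i % 2 = 1 then Orow (2*k+3) else Erow (2*k+3))
            ++ [Orow (2*k+3)] ++ [Erow (2*k+3)] := by
        unfold Closed
        rw [show 2*(k+1)+1 = (2*k+1)+1+1 by ring]
        rw [List.range_succ, List.range_succ, List.map_append, List.map_append]
        rw [List.map_cons, List.map_nil, List.map_cons, List.map_nil]
        rw [if_pos (by omega : (2*k+1) % 2 = 1), if_neg (by omega : ¬ ((2*k+1)+1) % 2 = 1)]
      rw [hclosed]
      simp [Erow]

lemma make_maze_alt_eq (n : Int) : make_maze_alt n = Closed (2*n+1).toNat := by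
  unfold make_maze_alt
  by_cases h : n < 0
  · rw [if_pos h]
    have : (2*n+1).toNat = 0 := by omega
    rw [this]
    simp [Closed]
  · rw [if_neg h, PySem.List.pyRange_zero, List.foldl_map, ringFold_eq]
    congr 1
    omega

-- ===== VERDICT (by name: the statement is the Claim_ definition above) =====
theorem make_maze_spec : Claim_equal_make_maze := by
  intro n _
  unfold Spec_make_maze
  rw [make_maze_eq n, make_maze_alt_eq n]
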